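-- pv_equiv track=rewrite | github.com/PoustouFlan/just-do-eat | justdoeat/__init__.py | minimum_buy
-- ===== SOURCE A (Python) =====
-- def minimum_buy(save, ingredients, k=1):
--     """
--     Yields k differents recipes which needs a fairly small amount of
--     ingredients to buy.
--     Note : this is equivalent to the "Minimum K-Union" problem, which is
--     NP-Complete, so the solution cannot be proven to be optimal.
--     """
--     bought = []
--     done = set()
--     for _ in range(k):
--         best = None
--         cost = float('inf')
--         for url, using in save.items():
--             if url in done:
--                 continue
--             this_cost = 0
--             for ingredient in using:
--                 if ingredient not in ingredients and ingredient not in bought: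
--                     this_cost += 1
--             if this_cost < cost:
--                 cost = this_cost
--                 best = url
--         yield best
--         done.add(best)
--         for ingredient in save[best]:
--             if ingredient not in ingredients and ingredient not in bought:
--                 bought.append(ingredient)
-- ===== SOURCE B (Python) =====
-- def minimum_buy(save, ingredients, k=1):
--     """Greedy k recipes minimizing new ingredients; residual needs are kept
--     per recipe and shrunk after each pick, so costs are never recomputed
--     against a growing bought list."""
--     stocked = set(ingredients)
--     rem = [(url, [x for x in using if x not in stocked])
--            for url, using in save.items()]
--     for _ in range(k):
--         best, need = min(rem, key=lambda p: len(p[1]))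
--         yield best
--         newly = set(need)
--         rem = [(url, [x for x in ns if x not in newly])
--                for url, ns in rem if url != best]
-- ===== Notes on version B (the rewrite author's own statement) =====
-- stated objective: faster
-- what changed: Instead of recomputing every recipe's cost each round by scanning its full ingredient list against a growing bought list, B keeps per-recipe residual need-lists (pre-filtered once through a set of stocked ingredients), picks the minimum with min(key=len), and shrinks the residuals through a set of the newly bought ingredients, so the |bought|-sized inner membership scans disappear.
import Mathlib
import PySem

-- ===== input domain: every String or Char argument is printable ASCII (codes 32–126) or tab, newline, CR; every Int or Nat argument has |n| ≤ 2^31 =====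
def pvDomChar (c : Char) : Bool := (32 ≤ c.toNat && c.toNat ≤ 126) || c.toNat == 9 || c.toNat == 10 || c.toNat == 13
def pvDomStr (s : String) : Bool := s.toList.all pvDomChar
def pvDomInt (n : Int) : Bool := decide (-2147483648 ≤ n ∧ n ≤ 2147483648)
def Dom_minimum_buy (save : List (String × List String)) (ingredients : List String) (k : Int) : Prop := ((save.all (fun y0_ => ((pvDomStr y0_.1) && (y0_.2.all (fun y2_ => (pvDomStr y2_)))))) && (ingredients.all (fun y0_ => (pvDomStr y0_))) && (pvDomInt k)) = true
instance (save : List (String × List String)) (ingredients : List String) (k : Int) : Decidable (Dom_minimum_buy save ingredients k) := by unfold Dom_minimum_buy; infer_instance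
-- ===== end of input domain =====

-- B replaces A's per-round recomputation of every recipe's cost against a growing
-- `bought` list by residual need-lists, filtered down once per round (a set for
-- stocked/newly-bought membership, min with a key for the selection). Both
-- functions are generators; the equivalence is about the yielded sequence.

-- ===== PORT A =====
-- 'ingredient not in ingredients and ingredient not in bought' (A's test, used twice)
def pvAmiss (ingredients bought : List String) (x : String) : Bool :=
  !ingredients.contains x && !bought.contains x

-- 'this_cost = 0; for ingredient in using: if …: this_cost += 1'
def pvACost (ingredients bought usingl : List String) : Int :=
  usingl.foldl (fun c x => if pvAmiss ingredients bought x then c + 1 else c) 0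

-- 'for ingredient in save[best]: if …: bought.append(ingredient)'
def pvABuy (ingredients bought usingl : List String) : List String :=
  usingl.foldl (fun b x => if pvAmiss ingredients b x then b ++ [x] else b) bought

-- 'best = None; cost = inf; for url, using in save.items(): if url in done: continue; …'
-- (cost = none models float('inf'); the cost expression is A's this_cost)
def pvASelect (items : List (String × List String)) (done : PySem.Set String)
    (ingredients bought : List String) : Option String × Option Int :=
  items.foldl (fun st p =>
    if !PySem.Set.contains done p.1 then
      match st.2 with
      | none => (some p.1, some (pvACost ingredients bought p.2))
      | some c => if pvACost ingredients bought p.2 < c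
                  then (some p.1, some (pvACost ingredients bought p.2)) else st
    else st) (none, none)

-- 'for _ in range(k): …' (the yielded urls accumulate in out)
def pvALoop (d : PySem.Dict String (List String)) (ingredients : List String) :
    Nat → PySem.Set String → List String → List String → List String
  | 0, _, _, out => out
  | n + 1, done, bought, out =>
    match (pvASelect d.items done ingredients bought).1 with
    | none => pvALoop d ingredients n done bought out
      -- best stayed None: Python yields None and then raises KeyError on save[None]; excluded by Pre_
    | some best =>
        pvALoop d ingredients n (PySem.Set.add done best)
          (pvABuy ingredients bought (d.getD best [])) (out ++ [best])

def minimum_buy (save : List (String × List String)) (ingredients : List String) (k : Int) : List String :=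
  pvALoop (PySem.Dict.ofList save) ingredients k.toNat PySem.Set.empty [] []

-- ===== PORT B =====
-- 'for _ in range(k): best, need = min(rem, key=lambda p: len(p[1])); …'
def pvBLoop : Nat → List (String × List String) → List String → List String
  | 0, _, out => out
  | n + 1, rem, out =>
    match PySem.List.min? rem (fun p => p.2.length) with
    | none => pvBLoop n rem out
      -- rem is empty: Python's min raises ValueError; excluded by Pre_
    | some bp =>
        let newly := PySem.Set.ofList bp.2
        pvBLoop n
          ((rem.filter (fun p => p.1 != bp.1)).map
            (fun p => (p.1, p.2.filter (fun x => !PySem.Set.contains newly x))))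
          (out ++ [bp.1])

def minimum_buy_alt (save : List (String × List String)) (ingredients : List String) (k : Int) : List String :=
  let stocked := PySem.Set.ofList ingredients
  pvBLoop k.toNat
    ((PySem.Dict.ofList save).items.map
      (fun p => (p.1, p.2.filter (fun x => !PySem.Set.contains stocked x)))) []

-- ===== PRECONDITION & SPEC =====
-- Pre_ excludes exactly the inputs on which A raises: when k exceeds the number of
-- distinct recipe urls, A's scan finds no undone recipe, best stays None, and
-- 'save[best]' raises KeyError (B's 'min' of the empty remaining list raises ValueError there).
def Pre_minimum_buy (save : List (String × List String)) (ingredients : List String) (k : Int) : Prop :=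
  k ≤ ((PySem.Set.ofList (save.map Prod.fst)).length : Int)
instance (save : List (String × List String)) (ingredients : List String) (k : Int) : Decidable (Pre_minimum_buy save ingredients k) := by unfold Pre_minimum_buy; infer_instance

def pvWitness_minimum_buy : (List (String × List String)) × List String × Int :=
  ([("soup", ["salt", "leek"]), ("cake", ["egg"])], ["salt"], 2)

def Spec_minimum_buy (save : List (String × List String)) (ingredients : List String) (k : Int) (out : List String) : Prop := out = minimum_buy_alt save ingredients k
instance (save : List (String × List String)) (ingredients : List String) (k : Int) (out : List String) : Decidable (Spec_minimum_buy save ingredients k out) := by unfold Spec_minimum_buy; infer_instance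

-- ===== CLAIM (what is proved, stated in full; the proofs are below) =====
def Claim_equal_minimum_buy : Prop := ∀ (save : List (String × List String)) (ingredients : List String) (k : Int), Dom_minimum_buy save ingredients k → Pre_minimum_buy save ingredients k → Spec_minimum_buy save ingredients k (minimum_buy save ingredients k)

-- ===== LEMMAS AND PROOFS =====

-- residual need of a recipe: occurrences not stocked and not yet bought
def pvRes (ingredients bought u : List String) : List String :=
  u.filter (pvAmiss ingredients bought)

-- B's remaining list as a function of A's state
def pvView (items : List (String × List String)) (ingredients : List String)
    (done : PySem.Set String) (bought : List String) : List (String × List String) :=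
  (items.filter (fun p => !PySem.Set.contains done p.1)).map
    (fun p => (p.1, pvRes ingredients bought p.2))

-- A's (best, cost) pair as a function of B's min?
def pvStOf (o : Option (String × List String)) : Option String × Option Int :=
  (o.map Prod.fst, o.map (fun p => ((p.2.length : Nat) : Int)))

theorem pvAmiss_iff (ing b : List String) (x : String) :
    pvAmiss ing b x = true ↔ x ∉ ing ∧ x ∉ b := by
  simp [pvAmiss, List.contains_eq_mem]

theorem pvACost_eq (ing bought u : List String) :
    pvACost ing bought u = ((pvRes ing bought u).length : Int) := by
  unfold pvACost pvRes
  rw [PySem.List.foldl_if_add_one]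
  simp [List.countP_eq_length_filter]

theorem pvABuy_mem (ing : List String) (u : List String) :
    ∀ (b : List String) (y : String),
      y ∈ pvABuy ing b u ↔ y ∈ b ∨ (y ∈ u ∧ ing.contains y = false) := by
  induction u with
  | nil => simp [pvABuy]
  | cons x u ih =>
    intro b y
    rw [show pvABuy ing b (x :: u) = pvABuy ing (if pvAmiss ing b x = true then b ++ [x] else b) u from rfl, ih]
    simp only [List.contains_eq_mem, decide_eq_false_iff_not, List.mem_cons]
    split_ifs with h
    · rw [pvAmiss_iff] at h
      simp only [List.mem_append, List.mem_singleton]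
      by_cases hy : y = x
      · subst hy; tauto
      · tauto
    · rw [pvAmiss_iff, not_and_or, not_not] at h
      by_cases hy : y = x
      · subst hy; tauto
      · tauto

theorem pvSel_fold (ing bought : List String) (done : PySem.Set String) :
    ∀ (l : List (String × List String)) (o : Option (String × List String)),
      l.foldl (fun st p =>
        if !PySem.Set.contains done p.1 then
          match st.2 with
          | none => (some p.1, some (pvACost ing bought p.2))
          | some c => if pvACost ing bought p.2 < c
                      then (some p.1, some (pvACost ing bought p.2)) else st
        else st) (pvStOf o)
      = pvStOf ((l.filter (fun p => !PySem.Set.contains done p.1)).foldl (fun acc p =>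
          match acc with
          | none => some (p.1, pvRes ing bought p.2)
          | some m => if (pvRes ing bought p.2).length < m.2.length
                      then some (p.1, pvRes ing bought p.2) else some m) o) := by
  intro l
  induction l with
  | nil => intro o; rfl
  | cons p l ih =>
    intro o
    rw [List.foldl_cons, List.filter_cons]
    by_cases hp : (!PySem.Set.contains done p.1) = true
    · rw [if_pos hp, if_pos hp, List.foldl_cons, ← ih]
      congr 1
      cases o with
      | none => simp [pvStOf, pvACost_eq]
      | some m =>
        simp only [pvStOf, Option.map_some, pvACost_eq]
        by_cases h : (pvRes ing bought p.2).length < m.2.length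
        · rw [if_pos (by exact_mod_cast h), if_pos h]; rfl
        · rw [if_neg (by exact_mod_cast h), if_neg h]; rfl
    · rw [if_neg hp, if_neg hp, ih]

theorem pvASelect_eq (items : List (String × List String)) (done : PySem.Set String)
    (ing bought : List String) :
    pvASelect items done ing bought =
      pvStOf (PySem.List.min? (pvView items ing done bought) (fun p => p.2.length)) := by
  unfold pvASelect pvView
  refine Eq.trans (pvSel_fold ing bought done items none) ?_
  congr 1
  rw [PySem.List.min?, List.foldl_map]
  refine PySem.List.foldl_congr_mem _ _ _ _ ?_
  intro acc x _
  cases acc <;> rfl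

theorem pvRes_buy (ing bought u v : List String) :
    pvRes ing (pvABuy ing bought u) v =
      (pvRes ing bought v).filter
        (fun x => !PySem.Set.contains (PySem.Set.ofList (pvRes ing bought u)) x) := by
  unfold pvRes
  rw [List.filter_filter]
  refine List.filter_congr ?_
  intro x _
  rw [Bool.eq_iff_iff]
  simp only [Bool.and_eq_true, Bool.not_eq_true', List.contains_eq_mem, decide_eq_false_iff_not,
    pvABuy_mem, PySem.Set.contains, PySem.Set.mem_ofList, List.mem_filter, pvAmiss_iff]
  tauto

theorem pvFilter_add (items : List (String × List String)) (done : PySem.Set String) (b : String) :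
    items.filter (fun p => !PySem.Set.contains (PySem.Set.add done b) p.1)
      = (items.filter (fun p => !PySem.Set.contains done p.1)).filter (fun p => p.1 != b) := by
  rw [List.filter_filter]
  refine List.filter_congr ?_
  intro p _
  rw [Bool.eq_iff_iff]
  simp only [Bool.and_eq_true, Bool.not_eq_true', List.contains_eq_mem, decide_eq_false_iff_not,
    PySem.Set.contains, PySem.Set.mem_add, bne_iff_ne, ne_eq]
  tauto

theorem pvView_step (d : PySem.Dict String (List String)) (ing bought : List String)
    (done : PySem.Set String) (b : String) (u : List String)
    (hmem : (b, u) ∈ d.items) (hnd : d.keys.Nodup) :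
    pvView d.items ing (PySem.Set.add done b) (pvABuy ing bought (d.getD b []))
      = ((pvView d.items ing done bought).filter (fun p => p.1 != b)).map
          (fun p => (p.1, p.2.filter
            (fun x => !PySem.Set.contains (PySem.Set.ofList (pvRes ing bought u)) x))) := by
  have hget : d.getD b [] = u := PySem.Dict.getD_of_mem_items d hmem hnd []
  unfold pvView
  rw [List.filter_map, List.map_map, pvFilter_add, hget]
  refine List.map_congr_left ?_
  intro p _
  simp only [Function.comp_apply]
  exact congrArg (fun w => (p.1, w)) (pvRes_buy ing bought u p.2)

theorem pvLoop_eq (d : PySem.Dict String (List String)) (ing : List String)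
    (hnd : d.keys.Nodup) :
    ∀ (n : Nat) (done : PySem.Set String) (bought out : List String),
      pvALoop d ing n done bought out = pvBLoop n (pvView d.items ing done bought) out := by
  intro n
  induction n with
  | zero => intro done bought out; rfl
  | succ n ih =>
    intro done bought out
    rw [show pvALoop d ing (n + 1) done bought out
        = (match (pvASelect d.items done ing bought).1 with
           | none => pvALoop d ing n done bought out
           | some best =>
               pvALoop d ing n (PySem.Set.add done best)
                 (pvABuy ing bought (d.getD best [])) (out ++ [best])) from rfl]
    rw [show pvBLoop (n + 1) (pvView d.items ing done bought) out
        = (match PySem.List.min? (pvView d.items ing done bought) (fun p => p.2.length) with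
           | none => pvBLoop n (pvView d.items ing done bought) out
           | some bp =>
               pvBLoop n
                 (((pvView d.items ing done bought).filter (fun p => p.1 != bp.1)).map
                   (fun p => (p.1, p.2.filter
                     (fun x => !PySem.Set.contains (PySem.Set.ofList bp.2) x))))
                 (out ++ [bp.1])) from rfl]
    rw [pvASelect_eq]
    cases hm : PySem.List.min? (pvView d.items ing done bought) (fun p => p.2.length) with
    | none => exact ih done bought out
    | some bp =>
      obtain ⟨b, need⟩ := bp
      have hbp : (b, need) ∈ pvView d.items ing done bought := PySem.List.min?_mem hm
      unfold pvView at hbp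
      rw [List.mem_map] at hbp
      obtain ⟨p, hp, hpe⟩ := hbp
      rw [List.mem_filter] at hp
      obtain ⟨p1, p2⟩ := p
      have hb : p1 = b := congrArg Prod.fst hpe
      have hneed : pvRes ing bought p2 = need := congrArg Prod.snd hpe
      subst hb
      refine Eq.trans (b := pvALoop d ing n (PySem.Set.add done p1)
        (pvABuy ing bought (d.getD p1 [])) (out ++ [p1])) rfl ?_
      rw [ih, pvView_step d ing bought done p1 p2 hp.1 hnd, hneed]

theorem pvNodupKeys (save : List (String × List String)) :
    (PySem.Dict.ofList save).keys.Nodup := by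
  have h0 : (PySem.Dict.empty : PySem.Dict String (List String)).keys.Nodup := by
    simp [PySem.Dict.keys_empty]
  exact PySem.Dict.nodup_keys_foldl_insert_key save Prod.fst (fun _ p => p.2) PySem.Dict.empty h0

theorem pvView_init (d : PySem.Dict String (List String)) (ing : List String) :
    pvView d.items ing PySem.Set.empty []
      = d.items.map (fun p => (p.1, p.2.filter
          (fun x => !PySem.Set.contains (PySem.Set.ofList ing) x))) := by
  unfold pvView
  rw [show d.items.filter (fun p => !PySem.Set.contains PySem.Set.empty p.1) = d.items from by
    simp [PySem.Set.contains, PySem.Set.empty]]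
  refine List.map_congr_left ?_
  intro p _
  refine congrArg (fun w => (p.1, w)) ?_
  unfold pvRes
  refine List.filter_congr ?_
  intro x _
  rw [Bool.eq_iff_iff]
  simp only [pvAmiss_iff, Bool.not_eq_true', List.contains_eq_mem, decide_eq_false_iff_not,
    PySem.Set.contains, PySem.Set.mem_ofList, List.not_mem_nil]
  tauto

theorem pvMain (save : List (String × List String)) (ingredients : List String) (k : Int) :
    minimum_buy save ingredients k = minimum_buy_alt save ingredients k := by
  unfold minimum_buy minimum_buy_alt
  rw [pvLoop_eq (PySem.Dict.ofList save) ingredients (pvNodupKeys save) k.toNat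
      PySem.Set.empty [] []]
  rw [pvView_init]

-- ===== VERDICT (by name: the statement is the Claim_ definition above) =====
theorem minimum_buy_spec : Claim_equal_minimum_buy := by
  intro save ingredients k _ _
  unfold Spec_minimum_buy
  exact pvMain save ingredients k
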